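-- pv_equiv track=rewrite | github.com/MAFiA303/base-conversion | baseConv.py | asc2text
-- ===== SOURCE A (Python) =====
-- def asc2text(asc):
--     asc = str(asc)
--     left0= len(asc)%3
--     if( left0 != 0):
--         asc = "0"*(3-left0) + asc
--     txt = ""
--     for i in range(0,len(asc),3):
--         txt += chr(int(asc[i:i+3]))
--     return txt
-- ===== SOURCE B (Python) =====
-- def asc2text(asc):
--     s = str(asc)
--     out = []
--     i = len(s)
--     while i > 0:
--         out.append(chr(int(s[max(0, i - 3):i])))
--         i -= 3
--     return ''.join(reversed(out))
-- ===== Notes on version B (the rewrite author's own statement) =====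
-- stated objective: alternative
-- what changed: B scans the decimal string in 3-digit chunks from the right with an index loop and joins the reversed chunk list, instead of A's left-padding the string to a multiple of 3 and concatenating characters in a forward range-step-3 loop; no padding string is ever built.
-- outside the precondition, e.g. on asc2text(-5): A raises ValueError, B raises ValueError
import Mathlib
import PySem

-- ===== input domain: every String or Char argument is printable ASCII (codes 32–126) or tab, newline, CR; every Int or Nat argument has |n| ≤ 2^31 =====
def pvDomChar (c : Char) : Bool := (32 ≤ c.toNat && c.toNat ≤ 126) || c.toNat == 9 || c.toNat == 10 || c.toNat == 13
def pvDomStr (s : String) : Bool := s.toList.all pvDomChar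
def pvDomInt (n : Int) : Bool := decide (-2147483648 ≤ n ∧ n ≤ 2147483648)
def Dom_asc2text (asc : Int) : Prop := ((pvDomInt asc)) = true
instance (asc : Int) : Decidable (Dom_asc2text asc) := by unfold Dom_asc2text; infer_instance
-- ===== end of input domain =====

-- B reads the decimal string in 3-digit chunks from the right and joins the reversed chunk list,
-- instead of A's left-padding to a multiple of 3 and forward concatenation (objective: alternative).

-- chr(int(g)), used by both ports; Python raises ValueError where ofChars? is none or the value is
-- no code point — under Pre_ every group is a nonempty digit string of at most three digits, so the
-- fallback and the toNat clamp are never reached.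
def pyChrInt (g : List Char) : Char :=
  match PySem.Int.ofChars? g with
  | some v => Char.ofNat v.toNat
  | none => Char.ofNat 0

-- ===== PORT A =====
def asc2text (asc : Int) : String :=
  let s := PySem.Int.toChars asc
  let left0 := PySem.Int.mod ((s.length : Int)) 3
  let s := if left0 ≠ 0 then List.replicate (3 - left0).toNat '0' ++ s else s
  let txt := (PySem.List.pyRange 0 (s.length : Int) 3).foldl
      (fun acc i => acc ++ [pyChrInt (PySem.List.slice s (some i) (some (i + 3)))]) []
  String.ofList txt

-- ===== PORT B =====
def altLoop (s : List Char) (i : Nat) : List Char :=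
  if i = 0 then []
  else
    pyChrInt (PySem.List.slice s (some (max 0 ((i : Int) - 3))) (some (i : Int)))
      :: altLoop s (i - 3)
termination_by i
decreasing_by omega

def asc2text_alt (asc : Int) : String :=
  let s := PySem.Int.toChars asc
  String.ofList (altLoop s s.length).reverse

-- ===== PRECONDITION & SPEC =====
-- Pre_ excludes negative asc, on which BOTH programs raise ValueError (A at int of a group
-- containing '-', or at chr of a negative; B at chr of a negative).
def Pre_asc2text (asc : Int) : Prop := 0 ≤ asc
instance (asc : Int) : Decidable (Pre_asc2text asc) := by unfold Pre_asc2text; infer_instance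
def pvWitness_asc2text : Int := 72101108
def Spec_asc2text (asc : Int) (out : String) : Prop := out = asc2text_alt asc
instance (asc : Int) (out : String) : Decidable (Spec_asc2text asc out) := by unfold Spec_asc2text; infer_instance

-- ===== CLAIM (what is proved, stated in full; the proofs are below) =====
def Claim_equal_asc2text : Prop := ∀ (asc : Int), Dom_asc2text asc → Pre_asc2text asc → Spec_asc2text asc (asc2text asc)

-- ===== LEMMAS AND PROOFS =====

-- a decimal digit char is Char.ofNat (48 + d) for some d < 10
lemma digit_exists (c : Char) (h : c.isDigit = true) : ∃ d : Fin 10, c = Char.ofNat (48 + d.1) := by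
  simp [Char.isDigit] at h
  obtain ⟨h1, h2⟩ := h
  have h1' : 48 ≤ c.toNat := by exact_mod_cast UInt32.le_iff_toNat_le.mp h1
  have h2' : c.toNat ≤ 57 := by exact_mod_cast UInt32.le_iff_toNat_le.mp h2
  refine ⟨⟨c.toNat - 48, by omega⟩, ?_⟩
  have h48 : 48 + (c.toNat - 48) = c.toNat := by omega
  rw [h48, Char.ofNat_toNat]

-- int ignores leading zeros on a digit group (finite check over the digit alphabet)
lemma pad1 : ∀ (x y : Fin 10),
    pyChrInt ['0', Char.ofNat (48 + x.1), Char.ofNat (48 + y.1)]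
      = pyChrInt [Char.ofNat (48 + x.1), Char.ofNat (48 + y.1)] := by decide

lemma pad2 : ∀ (x : Fin 10),
    pyChrInt ['0', '0', Char.ofNat (48 + x.1)] = pyChrInt [Char.ofNat (48 + x.1)] := by decide

-- central invariant: A's forward groups over the padded string = B's right-to-left loop, reversed
lemma core : ∀ (i p : Nat) (s : List Char), i ≤ s.length → p < 3 → (p + i) % 3 = 0 →
    (∀ c ∈ s, c.isDigit = true) →
    (List.range ((p + i) / 3)).map
        (fun (j : Nat) => pyChrInt (PySem.List.slice (List.replicate p '0' ++ s)
          (some (3 * (j : Int))) (some (3 * (j : Int) + 3))))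
      = (altLoop s i).reverse := by
  intro i
  induction i using Nat.strong_induction_on with
  | _ i ih =>
    intro p s hle hp3 hmod hd
    rw [altLoop]
    by_cases h0 : i = 0
    · subst h0
      have hp0 : p = 0 := by omega
      subst hp0
      simp
    · rw [if_neg h0]
      by_cases h3 : i ≤ 3
      · -- single group, p + i = 3
        have hpi : p + i = 3 := by omega
        have hi3 : i - 3 = 0 := by omega
        rw [hi3, altLoop]
        simp only [List.reverse_cons]
        have hdiv : (p + i) / 3 = 1 := by omega
        rw [hdiv]
        have hmax : max 0 ((i : Int) - 3) = (0 : Int) := by omega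
        rw [hmax]
        simp only [List.range_one]
        norm_num
        rw [PySem.List.slice_to (List.replicate p '0' ++ s) (by norm_num : (0:Int) ≤ (3:Int))]
        have h3n : (3:Int).toNat = 3 := rfl
        rw [h3n]
        have htake : (List.replicate p '0' ++ s).take 3 = List.replicate p '0' ++ s.take i := by
          rw [List.take_append]
          simp only [List.take_replicate, List.length_replicate]
          have hmin : min 3 p = p := by omega
          have h3p : 3 - p = i := by omega
          rw [hmin, h3p]
        norm_num at htake ⊢
        rw [htake]
        interval_cases p
        · simp
        · -- p = 1, i = 2
          have hi : i = 2 := by omega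
          subst hi
          obtain ⟨a, s1, rfl⟩ : ∃ a t, s = a :: t := by
            cases s with | nil => simp at hle | cons a t => exact ⟨a, t, rfl⟩
          obtain ⟨b, s2, rfl⟩ : ∃ b t, s1 = b :: t := by
            cases s1 with | nil => simp at hle | cons b t => exact ⟨b, t, rfl⟩
          obtain ⟨x, rfl⟩ := digit_exists a (hd a (by simp))
          obtain ⟨y, rfl⟩ := digit_exists b (hd b (by simp))
          simpa using pad1 x y
        · -- p = 2, i = 1
          have hi : i = 1 := by omega
          subst hi
          obtain ⟨a, s1, rfl⟩ : ∃ a t, s = a :: t := by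
            cases s with | nil => simp at hle | cons a t => exact ⟨a, t, rfl⟩
          obtain ⟨x, rfl⟩ := digit_exists a (hd a (by simp))
          simpa using pad2 x
      · -- step: i > 3, peel the last group on both sides
        have hdiv : (p + i) / 3 = (p + (i - 3)) / 3 + 1 := by omega
        rw [hdiv, List.range_succ, List.map_append, List.reverse_cons]
        rw [ih (i - 3) (by omega) p s (by omega) hp3 (by omega) hd]
        congr 1
        simp only [List.map_cons, List.map_nil]
        have hm : (3 : Int) * ((p + (i - 3)) / 3 : Nat) = ((p + i - 3 : Nat) : Int) := by
          push_cast
          omega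
        rw [hm]
        have hb : ((p + i - 3 : Nat) : Int) + 3 = ((p + i : Nat) : Int) := by omega
        rw [hb, PySem.List.slice_natCast]
        have hmax : max 0 ((i : Int) - 3) = ((i - 3 : Nat) : Int) := by omega
        rw [hmax, PySem.List.slice_natCast]
        have hc1 : p + i - (p + i - 3) = 3 := by omega
        have hc2 : i - (i - 3) = 3 := by omega
        rw [hc1, hc2]
        congr 1
        rw [List.drop_append]
        simp only [List.drop_replicate, List.length_replicate]
        have h1 : p - (p + i - 3) = 0 := by omega
        have h2 : p + i - 3 - p = i - 3 := by omega
        rw [h1, h2]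
        simp

-- ===== VERDICT (by name: the statement is the Claim_ definition above) =====
theorem asc2text_spec : Claim_equal_asc2text := by
  intro asc _ hpre
  unfold Spec_asc2text
  have hpre' : (0:Int) ≤ asc := hpre
  simp only [asc2text, asc2text_alt]
  have hs : PySem.Int.toChars asc = Nat.toDigits 10 asc.toNat := by
    rw [PySem.Int.toChars, if_neg (by omega)]
  rw [hs]
  have hd : ∀ c ∈ Nat.toDigits 10 asc.toNat, c.isDigit = true :=
    fun c hc => Nat.isDigit_of_mem_toDigits (by norm_num) (by norm_num) hc
  generalize hsg : Nat.toDigits 10 asc.toNat = s at hd ⊢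
  have hmod3 : PySem.Int.mod ((s.length : Int)) 3 = ((s.length % 3 : Nat) : Int) := by
    exact_mod_cast PySem.Int.mod_natCast s.length 3
  rw [hmod3]
  by_cases hz : s.length % 3 = 0
  · rw [hz]
    simp only [Nat.cast_zero, ne_eq, not_true_eq_false, if_false,
      PySem.List.foldl_append_singleton_eq_map, List.nil_append]
    rw [PySem.List.pyRange_of_pos _ _ (by norm_num), List.map_map]
    have hcnt : (if (0:Int) < (s.length : Int) then (((s.length : Int) - 0 + 3 - 1)/3).toNat else 0)
        = (0 + s.length) / 3 := by split_ifs with h <;> omega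
    rw [hcnt]
    rw [show (List.map (((fun i => pyChrInt (PySem.List.slice s (some i) (some (i + 3)))) ∘
        fun k : Nat => 0 + 3 * (k:Int))) (List.range ((0 + s.length) / 3)))
      = (List.range ((0 + s.length) / 3)).map
        (fun (j : Nat) => pyChrInt (PySem.List.slice (List.replicate 0 '0' ++ s)
          (some (3 * (j : Int))) (some (3 * (j : Int) + 3)))) from by
        apply List.map_congr_left; intro k _; simp]
    rw [core s.length 0 s le_rfl (by norm_num) (by omega) hd]
  · have hne : ((s.length % 3 : Nat) : Int) ≠ 0 := by
      exact fun h => hz (by exact_mod_cast h)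
    rw [if_pos hne]
    have hp : ((3:Int) - ((s.length % 3 : Nat) : Int)).toNat = 3 - s.length % 3 := by omega
    rw [hp]
    simp only [PySem.List.foldl_append_singleton_eq_map, List.nil_append]
    have hlen : ((List.replicate (3 - s.length % 3) '0' ++ s).length : Int)
        = (((3 - s.length % 3) + s.length : Nat) : Int) := by simp
    rw [hlen, PySem.List.pyRange_of_pos _ _ (by norm_num), List.map_map]
    have hcnt : (if (0:Int) < (((3 - s.length % 3) + s.length : Nat) : Int)
        then (((((3 - s.length % 3) + s.length : Nat) : Int) - 0 + 3 - 1)/3).toNat else 0)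
        = ((3 - s.length % 3) + s.length) / 3 := by split_ifs with h <;> omega
    rw [hcnt]
    rw [show (List.map (((fun i => pyChrInt (PySem.List.slice (List.replicate (3 - s.length % 3) '0' ++ s) (some i) (some (i + 3)))) ∘
        fun k : Nat => 0 + 3 * (k:Int))) (List.range (((3 - s.length % 3) + s.length) / 3)))
      = (List.range (((3 - s.length % 3) + s.length) / 3)).map
        (fun (j : Nat) => pyChrInt (PySem.List.slice (List.replicate (3 - s.length % 3) '0' ++ s)
          (some (3 * (j : Int))) (some (3 * (j : Int) + 3)))) from by
        apply List.map_congr_left; intro k _; simp]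
    rw [core s.length (3 - s.length % 3) s le_rfl (by omega) (by omega) hd]
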